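-- pv_equiv track=rewrite | github.com/minkaas/AdventOfCode_2 | 2024/Day19/Day19.py | part1
-- ===== SOURCE A (Python) =====
-- def starts_with_token(line, tokens):
--     result = []
--     for token in tokens:
--         if len(token) <= len(line):
--             if token == line[:len(token)]:
--                 result.append(token)
--     return result
--
-- def rgbw_lexer(data, tokens):
--     possibles = starts_with_token(data, tokens)
--     if data == '':
--         return True
--     if len(possibles) == 0:
--         return False
--     elif len(possibles) == 1:
--         return rgbw_lexer(data[len(possibles[0]):], tokens)
--     else:
--         possible = False
--         i = 0
--         while not possible and i < len(possibles):
--             if rgbw_lexer(data[len(possibles[i]):], tokens):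
--                 return True
--             i += 1
--         return False
--
-- def part1(data, tokens):
--     result = 0
--     impossibles = []
--     i = 0
--     for dat in data:
--         if rgbw_lexer(dat, tokens):
--             result += 1
--         else:
--             impossibles.append(i)
--         i += 1
--     return result, impossibles
-- ===== SOURCE B (Python) =====
-- def part1(data, tokens):
--     def can(s):
--         n = len(s)
--         dp = [False] * (n + 1)
--         dp[n] = True
--         for i in range(n - 1, -1, -1):
--             dp[i] = any(s.startswith(t, i) and dp[i + len(t)] for t in tokens)
--         return dp[0]
--     impossibles = [i for i, s in enumerate(data) if not can(s)]
--     return len(data) - len(impossibles), impossibles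
-- ===== Notes on version B (the rewrite author's own statement) =====
-- stated objective: faster
-- what changed: Replaced A's exponential backtracking recursion (re-exploring every matching prefix token) with a bottom-up boolean DP over suffix positions (word-break), computing each string's feasibility in one pass over positions and tokens.
import Mathlib
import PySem

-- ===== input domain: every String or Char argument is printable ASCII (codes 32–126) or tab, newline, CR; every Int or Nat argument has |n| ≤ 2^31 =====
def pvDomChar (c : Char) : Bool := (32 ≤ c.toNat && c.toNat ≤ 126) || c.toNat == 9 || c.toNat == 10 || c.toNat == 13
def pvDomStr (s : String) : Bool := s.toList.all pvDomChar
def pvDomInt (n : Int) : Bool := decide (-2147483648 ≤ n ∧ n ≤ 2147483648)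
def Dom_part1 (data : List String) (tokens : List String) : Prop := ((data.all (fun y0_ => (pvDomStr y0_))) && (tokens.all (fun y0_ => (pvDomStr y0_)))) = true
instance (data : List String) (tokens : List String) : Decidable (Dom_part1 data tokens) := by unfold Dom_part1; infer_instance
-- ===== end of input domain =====

-- B replaces A's exponential backtracking search with a bottom-up word-break DP over
-- suffix positions (objective: faster, asymptotic).

-- ===== PORT A =====
def startsWithToken (line : List Char) (tokens : List (List Char)) : List (List Char) :=
  tokens.foldl
    (fun result token =>
      if token.length ≤ line.length then
        if token = line.take token.length then result ++ [token] else result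
      else result)
    []

-- fuel only makes the recursion total: inside Pre_ (no empty token) fuel = |line|+1 never runs out;
-- where Python would recurse forever (RecursionError), the input is outside Pre_.
mutual
def rgbwLexer (fuel : Nat) (line : List Char) (tokens : List (List Char)) : Bool :=
  match fuel with
  | 0 => false
  | fuel + 1 =>
    let possibles := startsWithToken line tokens
    if line = [] then true
    else if possibles.length = 0 then false
    else if possibles.length = 1 then
      rgbwLexer fuel (line.drop (possibles.headD []).length) tokens
    else
      tryPossibles fuel line tokens possibles
termination_by (fuel, 0)

def tryPossibles (fuel : Nat) (line : List Char) (tokens : List (List Char))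
    (ps : List (List Char)) : Bool :=
  match ps with
  | [] => false
  | p :: ps' =>
    if rgbwLexer fuel (line.drop p.length) tokens then true
    else tryPossibles fuel line tokens ps'
termination_by (fuel, ps.length + 1)
end

def part1 (data : List String) (tokens : List String) : Int × List Int :=
  let toks := tokens.map String.toList
  let r := data.foldl
    (fun (acc : Int × List Int × Int) dat =>
      if rgbwLexer (dat.toList.length + 1) dat.toList toks then
        (acc.1 + 1, acc.2.1, acc.2.2 + 1)
      else
        (acc.1, acc.2.1 ++ [acc.2.2], acc.2.2 + 1))
    (0, [], 0)
  (r.1, r.2.1)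

-- ===== PORT B =====
-- s.startswith(t, i) is ported as t.isPrefixOf (s.drop i): exact for 0 ≤ i ≤ len(s), the only use here.
def canChain (s : List Char) (toks : List (List Char)) : Bool :=
  let n := s.length
  let dp0 := (List.replicate (n + 1) false).set n true
  let dp := ((List.range n).reverse).foldl
    (fun dp i =>
      dp.set i (toks.any (fun t => t.isPrefixOf (s.drop i) && dp.getD (i + t.length) false)))
    dp0
  dp.getD 0 false

def part1_alt (data : List String) (tokens : List String) : Int × List Int :=
  let toks := tokens.map String.toList
  let impossibles := (PySem.List.enumerate data 0).filterMap
    (fun p => if canChain p.2.toList toks then none else some p.1)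
  ((data.length : Int) - impossibles.length, impossibles)

-- ===== PRECONDITION & SPEC =====
-- the greedy first-matching-token consumption rule (used only to state Pre_)
def greedyOk (toks : List (List Char)) : List Char → Bool
  | [] => true
  | c :: rest =>
    match toks.find? (fun t => t.isPrefixOf (c :: rest)) with
    | none => false
    | some t => if t = [] then false else greedyOk toks ((c :: rest).drop t.length)
termination_by s => s.length
decreasing_by
  rename_i ht
  have : 0 < t.length := List.length_pos_of_ne_nil ht
  simp only [List.length_drop, List.length_cons]
  omega

-- Pre_ excludes exactly the inputs where A recurses forever and raises RecursionError:
-- those whose token list contains "" while some string is not consumed by the greedy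
-- first-matching-token rule (with "" among the tokens A can never return False, so it
-- returns normally iff that greedy consumption succeeds on every string).
def Pre_part1 (data : List String) (tokens : List String) : Prop :=
  "" ∉ tokens ∨ ∀ d ∈ data, greedyOk (tokens.map String.toList) d.toList = true
instance (data : List String) (tokens : List String) : Decidable (Pre_part1 data tokens) := by unfold Pre_part1; infer_instance

def pvWitness_part1 : List String × List String := (["ab", "c"], ["a", "b"])

def Spec_part1 (data : List String) (tokens : List String) (out : Int × List Int) : Prop := out = part1_alt data tokens
instance (data : List String) (tokens : List String) (out : Int × List Int) : Decidable (Spec_part1 data tokens out) := by unfold Spec_part1; infer_instance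

-- ===== CLAIM (what is proved, stated in full; the proofs are below) =====
def Claim_equal_part1 : Prop := ∀ (data : List String) (tokens : List String), Dom_part1 data tokens → Pre_part1 data tokens → Spec_part1 data tokens (part1 data tokens)

-- ===== LEMMAS AND PROOFS =====

-- reference predicate: s is a concatenation of nonempty tokens
def W (toks : List (List Char)) : List Char → Bool
  | [] => true
  | c :: rest =>
    toks.any (fun t =>
      if t ≠ [] ∧ t.isPrefixOf (c :: rest) then W toks ((c :: rest).drop t.length) else false)
termination_by s => s.length
decreasing_by
  rename_i h
  have ht : 0 < t.length := List.length_pos_of_ne_nil h.1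
  simp only [List.length_drop, List.length_cons]
  omega

lemma swt_go (line : List Char) :
    ∀ (l : List (List Char)) (acc : List (List Char)),
      l.foldl
        (fun result token =>
          if token.length ≤ line.length then
            if token = line.take token.length then result ++ [token] else result
          else result)
        acc
      = acc ++ l.filter (fun t => t.isPrefixOf line) := by
  intro l
  induction l with
  | nil => simp
  | cons t l ih =>
    intro acc
    simp only [List.foldl_cons, List.filter_cons]
    by_cases hp : t.isPrefixOf line
    · have hpre : t <+: line := List.isPrefixOf_iff_prefix.mp hp
      have hle : t.length ≤ line.length := hpre.length_le
      have ht : t = line.take t.length := List.prefix_iff_eq_take.mp hpre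
      rw [if_pos hle, if_pos ht, ih, hp]
      simp
    · have : (if t.length ≤ line.length then
          if t = line.take t.length then acc ++ [t] else acc
        else acc) = acc := by
        split_ifs with h1 h2
        · exact absurd (List.isPrefixOf_iff_prefix.mpr (List.prefix_iff_eq_take.mpr h2)) hp
        · rfl
        · rfl
      rw [this, ih]
      simp [hp]

lemma startsWithToken_eq (line : List Char) (toks : List (List Char)) :
    startsWithToken line toks = toks.filter (fun t => t.isPrefixOf line) := by
  rw [startsWithToken, swt_go]
  simp

lemma any_congr_mem {α : Type} (l : List α) (f g : α → Bool)
    (h : ∀ a ∈ l, f a = g a) : l.any f = l.any g := by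
  induction l with
  | nil => rfl
  | cons a l ih =>
    simp only [List.any_cons, h a (by simp), ih (fun b hb => h b (by simp [hb]))]

lemma any_filter_guard (g : List Char → Bool) (s : List Char) :
    ∀ (l : List (List Char)), [] ∉ l →
      l.any (fun t => if t ≠ [] ∧ t.isPrefixOf s then g t else false)
      = (l.filter (fun t => t.isPrefixOf s)).any g := by
  intro l
  induction l with
  | nil => simp
  | cons t l ih =>
    intro h
    have ht : t ≠ [] := by rintro rfl; exact h (by simp)
    have hl : [] ∉ l := fun hm => h (by simp [hm])
    simp only [List.any_cons, List.filter_cons]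
    by_cases hp : t.isPrefixOf s
    · rw [if_pos (⟨ht, hp⟩ : t ≠ [] ∧ t.isPrefixOf s = true), hp, ih hl]
      simp
    · rw [if_neg (by simp [hp]), ih hl]
      simp [hp]

lemma tryPossibles_eq_any (fuel : Nat) (line : List Char) (toks : List (List Char)) :
    ∀ ps, tryPossibles fuel line toks ps
      = ps.any (fun p => rgbwLexer fuel (line.drop p.length) toks) := by
  intro ps
  induction ps with
  | nil => rw [tryPossibles]; rfl
  | cons p ps ih =>
    rw [tryPossibles, List.any_cons, ih]
    cases rgbwLexer fuel (line.drop p.length) toks <;> simp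

lemma rgbw_eq_W (toks : List (List Char)) (hn : [] ∉ toks) :
    ∀ fuel s, s.length < fuel → rgbwLexer fuel s toks = W toks s := by
  intro fuel
  induction fuel with
  | zero => intro s h; omega
  | succ fuel ih =>
    intro s hs
    cases s with
    | nil => rw [rgbwLexer, W]; simp
    | cons c rest =>
      have hW : W toks (c :: rest)
          = (toks.filter (fun t => t.isPrefixOf (c :: rest))).any
              (fun p => W toks ((c :: rest).drop p.length)) := by
        rw [W]
        exact any_filter_guard _ _ toks hn
      rw [rgbwLexer]
      simp only [startsWithToken_eq]
      rcases hfil : toks.filter (fun t => t.isPrefixOf (c :: rest)) with _ | ⟨p, ps⟩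
      · simp [hfil, hW]
      · have hpmem : p ∈ toks.filter (fun t => t.isPrefixOf (c :: rest)) := by
          rw [hfil]; simp
        have hp1 : p ∈ toks := (List.mem_filter.mp hpmem).1
        have hp2 : p.isPrefixOf (c :: rest) := (List.mem_filter.mp hpmem).2
        have hpne : p ≠ [] := by rintro rfl; exact hn hp1
        have hplen : 0 < p.length := List.length_pos_of_ne_nil hpne
        have hdrop : ((c :: rest).drop p.length).length < fuel := by
          simp only [List.length_drop, List.length_cons]
          simp only [List.length_cons] at hs
          omega
        rcases ps with _ | ⟨q, ps⟩
        · simp [hfil, hW, ih _ hdrop]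
        · have hlem : ∀ x ∈ toks.filter (fun t => t.isPrefixOf (c :: rest)),
              rgbwLexer fuel ((c :: rest).drop x.length) toks
              = W toks ((c :: rest).drop x.length) := by
            intro x hx
            have hx1 : x ∈ toks := (List.mem_filter.mp hx).1
            have hxne : x ≠ [] := by rintro rfl; exact hn hx1
            have hxlen : 0 < x.length := List.length_pos_of_ne_nil hxne
            apply ih
            simp only [List.length_drop, List.length_cons]
            simp only [List.length_cons] at hs
            omega
          have := any_congr_mem (toks.filter (fun t => t.isPrefixOf (c :: rest)))
            (fun x => rgbwLexer fuel ((c :: rest).drop x.length) toks)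
            (fun x => W toks ((c :: rest).drop x.length)) hlem
          rw [hfil] at this
          simp only [List.any_cons] at this
          simp [hfil, hW, tryPossibles_eq_any, this]

lemma dp_fold (toks : List (List Char)) (s : List Char) :
    ∀ (j : Nat) (dp : List Bool), j ≤ s.length → dp.length = s.length + 1 →
      (∀ i, j ≤ i → i ≤ s.length → dp.getD i false = W toks (s.drop i)) →
      (∀ i, i < j → dp.getD i false = false) →
      ∀ i, i ≤ s.length →
        (((List.range j).reverse).foldl
          (fun dp i =>
            dp.set i (toks.any (fun t => t.isPrefixOf (s.drop i) && dp.getD (i + t.length) false)))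
          dp).getD i false = W toks (s.drop i) := by
  intro j
  induction j with
  | zero =>
    intro dp _ _ h1 _ i hi
    simpa using h1 i (Nat.zero_le i) hi
  | succ j ih =>
    intro dp hj hlen h1 h2 i hi
    rw [List.range_succ, List.reverse_append]
    simp only [List.reverse_singleton, List.singleton_append, List.foldl_cons]
    set v := toks.any (fun t => t.isPrefixOf (s.drop j) && dp.getD (j + t.length) false) with hv
    have hjlt : j < s.length := hj
    have hjdp : j < dp.length := by omega
    have hgetD : ∀ (i : Nat), (dp.set j v).getD i false
        = if i = j then v else dp.getD i false := by
      intro i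
      by_cases hij : i = j
      · subst hij
        rw [if_pos rfl, List.getD_eq_getElem?_getD, List.getElem?_set_self hjdp]
        rfl
      · rw [if_neg hij, List.getD_eq_getElem?_getD, List.getD_eq_getElem?_getD,
            List.getElem?_set_ne (fun h => hij h.symm)]
    -- the new cell holds W of its suffix
    have hval : v = W toks (s.drop j) := by
      have hne : s.drop j ≠ [] := by
        intro h
        have := congrArg List.length h
        simp at this
        omega
      obtain ⟨c, r, hcr⟩ := List.exists_cons_of_ne_nil hne
      rw [hcr, W, hv]
      apply any_congr_mem
      intro t _
      by_cases hte : t = []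
      · subst hte
        have h2j := h2 j (Nat.lt_succ_self j)
        rw [List.getD_eq_getElem?_getD] at h2j
        simp [← hcr, h2j]
      · by_cases hp : t.isPrefixOf (s.drop j)
        · have hpre : t <+: s.drop j := List.isPrefixOf_iff_prefix.mp hp
          have htle : t.length ≤ (s.drop j).length := hpre.length_le
          have htpos : 0 < t.length := List.length_pos_of_ne_nil hte
          simp only [List.length_drop] at htle
          have hup : dp.getD (j + t.length) false = W toks (s.drop (j + t.length)) :=
            h1 (j + t.length) (by omega) (by omega)
          rw [← hcr, if_pos (⟨hte, hp⟩ : t ≠ [] ∧ t.isPrefixOf (List.drop j s) = true),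
            List.drop_drop, hp, hup]
          simp
        · rw [← hcr, if_neg (by simp [hp])]
          simp [hp]
    apply ih (dp.set j v) (by omega) (by simp [hlen])
    · intro i' hji' hi'
      rw [hgetD]
      by_cases hij : i' = j
      · rw [if_pos hij, hval, hij]
      · rw [if_neg hij]
        exact h1 i' (by omega) hi'
    · intro i' hi'
      rw [hgetD, if_neg (by omega)]
      exact h2 i' (by omega)
    · exact hi

lemma canChain_eq_W (toks : List (List Char)) (s : List Char) :
    canChain s toks = W toks s := by
  rw [canChain]
  have h0 : ((List.replicate (s.length + 1) false).set s.length true).length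
      = s.length + 1 := by simp
  have := dp_fold toks s s.length ((List.replicate (s.length + 1) false).set s.length true)
    le_rfl h0
    (by
      intro i hi hi'
      have : i = s.length := le_antisymm hi' hi
      subst this
      rw [List.getD_eq_getElem?_getD, List.getElem?_set_self (by simp)]
      rw [List.drop_of_length_le le_rfl, W]
      rfl)
    (by
      intro i hi
      rw [List.getD_eq_getElem?_getD, List.getElem?_set_ne (by omega)]
      simp [Nat.lt_succ_of_lt hi])
    0 (Nat.zero_le _)
  simpa using this

lemma countP_split {α : Type} (p : α → Bool) (l : List α) :
    l.countP p + l.countP (fun a => !p a) = l.length := by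
  induction l with
  | nil => rfl
  | cons a l ih => by_cases h : p a <;> simp [h] <;> omega

def badIdx (toks : List (List Char)) (k : Int) : List String → List Int
  | [] => []
  | d :: ds => if W toks d.toList then badIdx toks (k + 1) ds else k :: badIdx toks (k + 1) ds

lemma foldA_eq (toks : List (List Char)) (hn : [] ∉ toks) :
    ∀ (data : List String) (res : Int) (imp : List Int) (k : Int),
      data.foldl
        (fun (acc : Int × List Int × Int) dat =>
          if rgbwLexer (dat.toList.length + 1) dat.toList toks then
            (acc.1 + 1, acc.2.1, acc.2.2 + 1)
          else
            (acc.1, acc.2.1 ++ [acc.2.2], acc.2.2 + 1))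
        (res, imp, k)
      = (res + (data.countP (fun d => W toks d.toList) : Int),
         imp ++ badIdx toks k data, k + data.length) := by
  intro data
  induction data with
  | nil => intro res imp k; simp [badIdx]
  | cons d ds ih =>
    intro res imp k
    simp only [List.foldl_cons]
    rw [rgbw_eq_W toks hn (d.toList.length + 1) d.toList (Nat.lt_succ_self _), badIdx]
    by_cases hW : W toks d.toList
    · rw [if_pos hW, if_pos hW, ih]
      rw [List.countP_cons_of_pos (by simpa using hW)]
      refine Prod.ext (by push_cast; ring) (Prod.ext rfl ?_)
      simp
      omega
    · rw [if_neg hW, if_neg (by simpa using hW), ih]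
      refine Prod.ext ?_ (Prod.ext ?_ ?_)
      · rw [List.countP_cons_of_neg (by simpa using hW)]
      · simp
      · simp; omega

lemma filterMap_enum_eq (toks : List (List Char)) :
    ∀ (data : List String) (k : Int),
      (PySem.List.enumerate data k).filterMap
        (fun p => if canChain p.2.toList toks then none else some p.1)
      = badIdx toks k data := by
  intro data
  induction data with
  | nil => intro k; simp [badIdx]
  | cons d ds ih =>
    intro k
    rw [PySem.List.enumerate_cons, List.filterMap_cons, badIdx, canChain_eq_W]
    by_cases hW : W toks d.toList
    · rw [if_pos hW, if_pos hW, ih]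
    · rw [if_neg hW, if_neg hW, ih]

lemma badIdx_length (toks : List (List Char)) :
    ∀ (data : List String) (k : Int),
      (badIdx toks k data).length = data.countP (fun d => !W toks d.toList) := by
  intro data
  induction data with
  | nil => intro k; simp [badIdx]
  | cons d ds ih =>
    intro k
    rw [badIdx]
    by_cases hW : W toks d.toList
    · rw [if_pos hW, ih, List.countP_cons_of_neg (by simp [hW])]
    · rw [if_neg hW, List.countP_cons_of_pos (by simp [hW])]
      simp [ih]

lemma rgbw_greedy (toks : List (List Char)) :
    ∀ fuel s, s.length < fuel → greedyOk toks s = true → rgbwLexer fuel s toks = true := by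
  intro fuel
  induction fuel with
  | zero => intro s h; omega
  | succ fuel ih =>
    intro s hs hg
    cases s with
    | nil => rw [rgbwLexer]; simp
    | cons c rest =>
      rw [greedyOk] at hg
      rcases hfind : toks.find? (fun t => t.isPrefixOf (c :: rest)) with _ | t
      · rw [hfind] at hg; simp at hg
      · rw [hfind] at hg
        dsimp only [] at hg
        have htne : t ≠ [] := by
          intro h; rw [if_pos h] at hg; exact Bool.false_ne_true hg
        rw [if_neg htne] at hg
        have htpos : 0 < t.length := List.length_pos_of_ne_nil htne
        have hdlt : ((c :: rest).drop t.length).length < fuel := by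
          simp only [List.length_drop, List.length_cons]
          simp only [List.length_cons] at hs
          omega
        have hrec := ih _ hdlt hg
        have hhead : (toks.filter (fun t => t.isPrefixOf (c :: rest))).head?
            = some t := by rw [List.head?_filter, hfind]
        rw [rgbwLexer]
        simp only [startsWithToken_eq]
        rcases hfil : toks.filter (fun t => t.isPrefixOf (c :: rest)) with _ | ⟨p, ps⟩
        · rw [hfil] at hhead; simp at hhead
        · have hpt : p = t := by rw [hfil] at hhead; simpa using hhead
          subst hpt
          rcases ps with _ | ⟨q, ps⟩
          · simp [hfil, hrec]
          · simp [hfil, tryPossibles_eq_any, hrec]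

lemma greedy_W (toks : List (List Char)) :
    ∀ s, greedyOk toks s = true → W toks s = true := by
  intro s
  induction hn : s.length using Nat.strong_induction_on generalizing s with
  | _ n ih =>
    cases s with
    | nil => intro _; rw [W]
    | cons c rest =>
      intro hg
      rw [greedyOk] at hg
      rcases hfind : toks.find? (fun t => t.isPrefixOf (c :: rest)) with _ | t
      · rw [hfind] at hg; simp at hg
      · rw [hfind] at hg
        dsimp only [] at hg
        have htne : t ≠ [] := by
          intro h; rw [if_pos h] at hg; exact Bool.false_ne_true hg
        rw [if_neg htne] at hg
        have htpos : 0 < t.length := List.length_pos_of_ne_nil htne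
        have hmem : t ∈ toks := List.mem_of_find?_eq_some hfind
        have hpre : t.isPrefixOf (c :: rest) = true :=
          List.find?_some (p := fun (u : List Char) => u.isPrefixOf (c :: rest)) hfind
        have hW : W toks ((c :: rest).drop t.length) = true := by
          apply ih ((c :: rest).drop t.length).length _ _ rfl hg
          simp only [List.length_drop, List.length_cons]
          simp only [List.length_cons] at hn
          omega
        rw [W, List.any_eq_true]
        exact ⟨t, hmem, by rw [if_pos ⟨htne, hpre⟩]; exact hW⟩

lemma foldA_true (toks : List (List Char)) :
    ∀ (data : List String) (res : Int) (imp : List Int) (k : Int),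
      (∀ d ∈ data, rgbwLexer (d.toList.length + 1) d.toList toks = true) →
      data.foldl
        (fun (acc : Int × List Int × Int) dat =>
          if rgbwLexer (dat.toList.length + 1) dat.toList toks then
            (acc.1 + 1, acc.2.1, acc.2.2 + 1)
          else
            (acc.1, acc.2.1 ++ [acc.2.2], acc.2.2 + 1))
        (res, imp, k)
      = (res + data.length, imp, k + data.length) := by
  intro data
  induction data with
  | nil => intro res imp k _; simp
  | cons d ds ih =>
    intro res imp k h
    simp only [List.foldl_cons]
    rw [h d (by simp), if_pos rfl, ih _ _ _ (fun d hd => h d (by simp [hd]))]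
    refine Prod.ext (by simp only [List.length_cons]; push_cast; omega) (Prod.ext rfl ?_)
    simp
    omega

lemma filterMap_true (toks : List (List Char)) :
    ∀ (data : List String) (k : Int),
      (∀ d ∈ data, canChain d.toList toks = true) →
      (PySem.List.enumerate data k).filterMap
        (fun p => if canChain p.2.toList toks then none else some p.1) = [] := by
  intro data
  induction data with
  | nil => intro k _; simp
  | cons d ds ih =>
    intro k h
    rw [PySem.List.enumerate_cons, List.filterMap_cons, h d (by simp), if_pos rfl]
    exact ih _ (fun d hd => h d (by simp [hd]))

-- ===== VERDICT (by name: the statement is the Claim_ definition above) =====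
theorem part1_spec : Claim_equal_part1 := by
  intro data tokens _ hpre
  unfold Spec_part1 part1 part1_alt
  rcases hpre with hpre | hpre
  case inr =>
    -- every string passes the greedy rule: both sides count everything possible
    have hA : ∀ d ∈ data,
        rgbwLexer (d.toList.length + 1) d.toList (tokens.map String.toList) = true :=
      fun d hd => rgbw_greedy _ _ _ (Nat.lt_succ_self _) (hpre d hd)
    have hB : ∀ d ∈ data, canChain d.toList (tokens.map String.toList) = true :=
      fun d hd => by rw [canChain_eq_W]; exact greedy_W _ _ (hpre d hd)
    simp only []
    rw [foldA_true _ _ _ _ _ hA, filterMap_true _ _ _ hB]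
    simp
  have hn : [] ∉ tokens.map String.toList := by
    intro h
    obtain ⟨t, ht, h2⟩ := List.mem_map.mp h
    have : t = "" := String.toList_inj.mp (by simpa using h2)
    subst this
    exact hpre ht
  simp only []
  rw [foldA_eq _ hn, filterMap_enum_eq]
  have hlen := badIdx_length (tokens.map String.toList) data 0
  have hsum := countP_split (fun d => W (tokens.map String.toList) d.toList) data
  refine Prod.ext ?_ ?_
  · simp only []
    rw [hlen]
    omega
  · simp
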